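-- pv_equiv track=rewrite | github.com/FreshWaterLee/Raspberry_Project | Image_Code(OpenCv)/lane_detect/Custom_F.py | r_detect
-- ===== SOURCE A (Python) =====
-- Lane_D = 7 ## Lane' Detecting Length
--
-- width = 640 ## frame Width
--
-- check_w = int(width/2) ## Center Point
--
-- def r_detect(image, w, h):
--     flag = 1
--     if(w < width-(Lane_D*2)):
--         if (image[h][w] > 0):
--             check,xx = check_r(image, w, h, flag)
--             if (check>0):
--                 return w
--             else:
--                 return r_detect(image,w+xx,h)
--         else:
--             return r_detect(image,w+1,h)
--     else:
--         check = check_w + int(check_w/2)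
--         return check
--
-- def check_r(image, i, h,flag):
--     if(flag == Lane_D):
--         check =1
--         return check, flag
--     else:
--         if (image[h][i] >= 1):
--             return check_r(image,i+1,h,flag+1)
--         else:
--             check = 0
--             return check,flag
-- ===== SOURCE B (Python) =====
-- WIDTH = 640   # frame width in pixels
-- LANE_D = 7    # lane detecting length
-- RUN = 6       # consecutive lit pixels required to accept a lane start
--
-- def r_detect(image, w, h):
--     limit = WIDTH - 2 * LANE_D
--     while w < limit:
--         if all(image[h][w + k] >= 1 for k in range(RUN)):
--             return w
--         w += 1
--     return WIDTH // 2 + WIDTH // 4  # no lane found: default position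
-- ===== Notes on version B (the rewrite author's own statement) =====
-- stated objective: simpler
-- what changed: A's two mutually recursive functions (outer scan plus a flag-threading run checker that also computes a skip distance) are replaced by one plain iterative scan that tests, at each position, whether the next 6 pixels are all lit; Pre_ excludes inputs where A raises (out-of-range h, rows too short for the scan, negative w) and, for uniformity of the row-length/nonnegativity condition, some same-shaped inputs on which both programs return the same value.
-- outside the precondition, e.g. on r_detect([[1, 1, 1, 1, 1, 1, 0]], -7, 0): A returns -7, B returns -7; on r_detect([[1, 1, 1, 1, 1, 1]], 0, 0): A returns 0, B returns 0
import Mathlib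
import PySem

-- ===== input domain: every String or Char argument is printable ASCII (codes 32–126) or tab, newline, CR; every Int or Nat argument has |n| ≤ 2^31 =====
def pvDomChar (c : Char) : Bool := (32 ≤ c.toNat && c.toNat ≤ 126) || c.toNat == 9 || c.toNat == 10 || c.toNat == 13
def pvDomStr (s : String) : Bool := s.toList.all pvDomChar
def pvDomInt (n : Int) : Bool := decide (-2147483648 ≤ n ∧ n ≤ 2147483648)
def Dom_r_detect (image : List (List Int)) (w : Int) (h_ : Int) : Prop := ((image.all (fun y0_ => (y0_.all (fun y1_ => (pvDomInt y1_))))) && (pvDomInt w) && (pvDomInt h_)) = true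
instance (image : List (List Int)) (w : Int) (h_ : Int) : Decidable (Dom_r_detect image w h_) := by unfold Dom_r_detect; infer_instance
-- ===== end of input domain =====

-- B replaces A's two mutually recursive scanners (flag threading plus a computed skip) by a single
-- iterative scan testing a 6-pixel window at each position; objective: simpler.


-- ===== PORT A =====
def Lane_D : Int := 7              -- Lane' Detecting Length
def pv_width : Int := 640          -- frame Width ('width' renamed: name clash with Mathlib)
def check_w : Int := pv_width / 2  -- Center Point, int(640/2) = 320

-- image[h][p] via Python indexing (negative wraparound); the .getD defaults replace Python's
-- IndexError, which Pre_r_detect excludes.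
def pvPix (image : List (List Int)) (h_ p : Int) : Int :=
  (PySem.List.pyGet? ((PySem.List.pyGet? image h_).getD []) p).getD 0

-- check_r from Source A; `fuel` is only a totality guard (r_detect calls it with flag = 1, fuel = 6,
-- so fuel runs out exactly when flag reaches Lane_D = 7 and the fuel-0 branch is never taken).
def check_r (image : List (List Int)) (i h_ flag : Int) (fuel : Nat) : Int × Int :=
  if flag = Lane_D then (1, flag)
  else
    match fuel with
    | 0 => (0, flag)
    | Nat.succ f =>
      if pvPix image h_ i ≥ 1 then check_r image (i + 1) h_ (flag + 1) f
      else (0, flag)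

-- the recursion of Source A's r_detect; `fuel` is only a totality guard: w strictly increases on every
-- recursive call, so the wrapper's fuel (pv_width - Lane_D*2 - w).toNat + 1 never runs out and the
-- fuel-0 branch (the value of the Python else-branch) is never taken.
def r_detect_go (image : List (List Int)) (h_ : Int) : Int → Nat → Int
  | _, 0 => check_w + check_w / 2
  | w, Nat.succ fuel =>
    if w < pv_width - Lane_D * 2 then
      if pvPix image h_ w > 0 then
        let c := check_r image w h_ 1 6
        if c.1 > 0 then w
        else r_detect_go image h_ (w + c.2) fuel
      else r_detect_go image h_ (w + 1) fuel
    else check_w + check_w / 2    -- int(check_w/2) = check_w / 2 on the nonnegative constant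

def r_detect (image : List (List Int)) (w : Int) (h_ : Int) : Int :=
  r_detect_go image h_ w ((pv_width - Lane_D * 2 - w).toNat + 1)

-- ===== PORT B =====
def b_WIDTH : Int := 640   -- frame width in pixels
def b_LANE_D : Int := 7    -- lane detecting length
def b_RUN : Nat := 6       -- consecutive lit pixels required to accept a lane start

-- Source B's `all(image[h][w+k] >= 1 for k in range(n))`, short-circuiting left to right
def runOK (image : List (List Int)) (h_ : Int) : Int → Nat → Bool
  | _, 0 => true
  | p, Nat.succ k => if pvPix image h_ p ≥ 1 then runOK image h_ (p + 1) k else false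

-- the while-loop of Source B; `fuel` is only a totality guard: w increases by 1 each iteration, so the
-- wrapper's fuel never runs out and the fuel-0 branch repeats the loop-exit value.
def bLoop (image : List (List Int)) (h_ : Int) : Int → Nat → Int
  | _, 0 => b_WIDTH / 2 + b_WIDTH / 4
  | w, Nat.succ fuel =>
    if w < b_WIDTH - 2 * b_LANE_D then
      if runOK image h_ w b_RUN then w
      else bLoop image h_ (w + 1) fuel
    else b_WIDTH / 2 + b_WIDTH / 4   -- WIDTH//2 + WIDTH//4 on nonnegative literals

def r_detect_alt (image : List (List Int)) (w : Int) (h_ : Int) : Int :=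
  bLoop image h_ w ((b_WIDTH - 2 * b_LANE_D - w).toNat + 1)

-- ===== PRECONDITION & SPEC =====
-- Pre_ excludes exactly the inputs where the Python A raises (IndexError for an out-of-range h or
-- a row too short for the scan, negative-index trouble for very negative w); for uniformity it
-- also excludes negative w and rows shorter than 631 on which A happens to return via
-- negative-index wraparound or an early hit — B returns the same value there (see cites), they
-- are excluded only because neighbouring inputs of the same shape raise.
def Pre_r_detect (image : List (List Int)) (w : Int) (h_ : Int) : Prop :=
  0 ≤ w ∧ (626 ≤ w ∨ (0 ≤ h_ ∧ h_ < (image.length : Int) ∧ 631 ≤ (image.getD h_.toNat []).length))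
instance (image : List (List Int)) (w : Int) (h_ : Int) : Decidable (Pre_r_detect image w h_) := by
  unfold Pre_r_detect; infer_instance

def pvWitness_r_detect : List (List Int) × Int × Int := ([], 700, 0)

def Spec_r_detect (image : List (List Int)) (w : Int) (h_ : Int) (out : Int) : Prop := out = r_detect_alt image w h_
instance (image : List (List Int)) (w : Int) (h_ : Int) (out : Int) : Decidable (Spec_r_detect image w h_ out) := by unfold Spec_r_detect; infer_instance

-- ===== CLAIM (what is proved, stated in full; the proofs are below) =====
def Claim_equal_r_detect : Prop := ∀ (image : List (List Int)) (w : Int) (h_ : Int), Dom_r_detect image w h_ → Pre_r_detect image w h_ → Spec_r_detect image w h_ (r_detect image w h_)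

-- ===== LEMMAS AND PROOFS =====

-- B's fuel is irrelevant as long as it exceeds the number of remaining loop iterations
theorem bLoop_fuel (f1 : Nat) : ∀ (f2 : Nat) (image : List (List Int)) (h_ p : Int),
    (626 - p).toNat < f1 → (626 - p).toNat < f2 →
    bLoop image h_ p f1 = bLoop image h_ p f2 := by
  induction f1 with
  | zero => intro _ _ _ _ h _; omega
  | succ f1 ih =>
    intro f2 image h_ p h1 h2
    match f2, h2 with
    | Nat.succ f2, _ =>
      show bLoop _ _ _ (f1 + 1) = bLoop _ _ _ (f2 + 1)
      rw [bLoop, bLoop]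
      by_cases hp : p < b_WIDTH - 2 * b_LANE_D
      · rw [if_pos hp, if_pos hp]
        by_cases hr : runOK image h_ p b_RUN
        · rw [if_pos hr, if_pos hr]
        · rw [if_neg hr, if_neg hr]
          have hp' : p < 626 := by simpa [b_WIDTH, b_LANE_D] using hp
          exact ih f2 image h_ (p + 1) (by omega) (by omega)
      · rw [if_neg hp, if_neg hp]

-- runOK computes the window condition
theorem runOK_iff (image : List (List Int)) (h_ : Int) (n : Nat) : ∀ (a : Int),
    runOK image h_ a n = true ↔ ∀ t : Nat, t < n → 1 ≤ pvPix image h_ (a + t) := by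
  induction n with
  | zero => intro a; simp [runOK]
  | succ m ih =>
    intro a
    rw [runOK]
    by_cases hp : pvPix image h_ a ≥ 1
    · rw [if_pos hp, ih (a + 1)]
      constructor
      · intro h t ht
        cases t with
        | zero => simpa using hp
        | succ s =>
          have := h s (by omega)
          push_cast
          rw [show a + ((s : Int) + 1) = a + 1 + s by ring]
          exact this
      · intro h t ht
        have := h (t + 1) (by omega)
        push_cast at this
        rw [show a + ((t : Int) + 1) = a + 1 + t by ring] at this
        exact this
    · rw [if_neg hp]
      constructor
      · intro h; exact absurd h (by simp)
      · intro h; exact absurd (by simpa using h 0 (Nat.succ_pos m)) hp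

-- A's check_r succeeds exactly when B's window test does
theorem check_fst_iff (image : List (List Int)) (h_ : Int) : ∀ (n : Nat) (i : Int),
    0 < (check_r image i h_ (7 - (n : Int)) n).1 ↔ runOK image h_ i n = true := by
  intro n
  induction n with
  | zero =>
    intro i
    rw [check_r, if_pos (by norm_num [Lane_D] : (7 : Int) - ((0 : Nat) : Int) = Lane_D)]
    simp [runOK]
  | succ m ih =>
    intro i
    rw [check_r, if_neg (by simp only [Lane_D]; push_cast; omega), runOK]
    by_cases hp : pvPix image h_ i ≥ 1
    · rw [if_pos hp, if_pos hp,
        show (7 : Int) - ((m + 1 : Nat) : Int) + 1 = 7 - (m : Int) by push_cast; ring]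
      exact ih (i + 1)
    · rw [if_neg hp, if_neg hp]; simp

-- when A's check_r fails, its returned flag locates a dead pixel at offset flag-1 < n
theorem check_fail (image : List (List Int)) (h_ : Int) : ∀ (n : Nat) (i : Int),
    ¬ 0 < (check_r image i h_ (7 - (n : Int)) n).1 →
    ∃ d : Nat, (d : Int) < n ∧ (check_r image i h_ (7 - (n : Int)) n).2 = 7 - (n : Int) + d ∧
      pvPix image h_ (i + d) < 1 := by
  intro n
  induction n with
  | zero =>
    intro i h
    rw [check_r, if_pos (by norm_num [Lane_D] : (7 : Int) - ((0 : Nat) : Int) = Lane_D)] at h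
    norm_num at h
  | succ m ih =>
    intro i h
    rw [check_r, if_neg (by simp only [Lane_D]; push_cast; omega)] at h ⊢
    by_cases hp : pvPix image h_ i ≥ 1
    · rw [if_pos hp] at h ⊢
      rw [show (7 : Int) - ((m + 1 : Nat) : Int) + 1 = 7 - (m : Int) by push_cast; ring] at h ⊢
      obtain ⟨d, hd1, hd2, hd3⟩ := ih (i + 1) h
      refine ⟨d + 1, by push_cast; omega, by rw [hd2]; push_cast; ring, ?_⟩
      rwa [show i + ((d + 1 : Nat) : Int) = i + 1 + d by push_cast; ring]
    · rw [if_neg hp] at h ⊢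
      exact ⟨0, by push_cast; omega, by push_cast; ring, by simpa using hp⟩

-- B's scan may skip positions whose window test fails
theorem bLoop_skip (image : List (List Int)) (h_ : Int) : ∀ (d : Nat) (p : Int) (f f' : Nat),
    (626 - p).toNat < f → (626 - (p + d)).toNat < f' →
    (∀ j : Nat, j < d → runOK image h_ (p + j) b_RUN = false) →
    bLoop image h_ p f = bLoop image h_ (p + d) f' := by
  intro d
  induction d with
  | zero =>
    intro p f f' h1 h2 _
    simp only [Nat.cast_zero, add_zero] at h2 ⊢
    exact bLoop_fuel f f' image h_ p h1 h2
  | succ m ih =>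
    intro p f f' h1 h2 hall
    match f, h1 with
    | Nat.succ f, _ =>
    rw [bLoop]
    by_cases hp : p < b_WIDTH - 2 * b_LANE_D
    · have hp' : p < 626 := by simpa [b_WIDTH, b_LANE_D] using hp
      rw [if_pos hp, if_neg (by simpa using hall 0 (by omega))]
      rw [ih (p + 1) f f' (by omega) (by rw [show p + 1 + (m : Int) = p + ((m + 1 : Nat) : Int) by push_cast; ring]; exact h2)
        (fun j hj => by
          have := hall (j + 1) (by omega)
          rwa [show p + ((j + 1 : Nat) : Int) = p + 1 + j by push_cast; ring] at this)]
      rw [show p + 1 + (m : Int) = p + ((m + 1 : Nat) : Int) by push_cast; ring]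
    · have hp' : ¬ p < 626 := by simpa [b_WIDTH, b_LANE_D] using hp
      rw [if_neg hp]
      match f', h2 with
      | Nat.succ f', _ =>
      rw [bLoop, if_neg (by simp only [b_WIDTH, b_LANE_D]; push_cast; omega)]

theorem main_eq (n : Nat) : ∀ (image : List (List Int)) (h_ w : Int) (f : Nat),
    (626 - w).toNat ≤ n → (626 - w).toNat < f →
    r_detect_go image h_ w f = bLoop image h_ w ((626 - w).toNat + 1) := by
  induction n with
  | zero =>
    intro image h_ w f hn hf
    have hw : ¬ w < pv_width - Lane_D * 2 := by simp only [pv_width, Lane_D]; omega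
    match f, hf with
    | Nat.succ f, _ =>
    rw [r_detect_go, if_neg hw, bLoop,
        if_neg (show ¬ w < b_WIDTH - 2 * b_LANE_D by simp only [b_WIDTH, b_LANE_D]; omega)]
    norm_num [check_w, pv_width, b_WIDTH]
  | succ n ih =>
    intro image h_ w f hn hf
    match f, hf with
    | Nat.succ f, _ =>
    by_cases hw : w < 626
    · rw [r_detect_go, if_pos (show w < pv_width - Lane_D * 2 by simp only [pv_width, Lane_D]; omega)]
      rw [bLoop, if_pos (show w < b_WIDTH - 2 * b_LANE_D by simp only [b_WIDTH, b_LANE_D]; omega)]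
      simp only [b_RUN]
      have hiff := check_fst_iff image h_ 6 w
      norm_num at hiff
      by_cases hp : pvPix image h_ w > 0
      · rw [if_pos hp]
        by_cases hc : (check_r image w h_ 1 6).1 > 0
        · rw [if_pos hc, if_pos (hiff.mp hc)]
        · rw [if_neg hc, if_neg (fun h => hc (hiff.mpr h))]
          obtain ⟨d, hd1, hd2, hd3⟩ := check_fail image h_ 6 w (by norm_num at hc ⊢; exact hc)
          norm_num at hd1 hd2
          rw [hd2, ih image h_ (w + (1 + d)) f (by omega) (by omega)]
          have hskip : ∀ j : Nat, j < d → runOK image h_ (w + 1 + j) b_RUN = false := by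
            intro j hj
            rw [Bool.eq_false_iff]
            simp only [b_RUN]
            intro h
            have := (runOK_iff image h_ 6 (w + 1 + j)).mp h (d - 1 - j) (by omega)
            rw [show w + 1 + (j : Int) + ((d - 1 - j : Nat) : Int) = w + d by omega] at this
            omega
          rw [bLoop_skip image h_ d (w + 1) ((626 - w).toNat) ((626 - (w + (1 + d))).toNat + 1)
            (by omega) (by rw [show w + 1 + (d : Int) = w + (1 + d) by ring]; omega) hskip]
          rw [show w + 1 + (d : Int) = w + (1 + (d : Int)) by ring]
      · rw [if_neg hp, if_neg (by
          intro h
          have := (runOK_iff image h_ 6 w).mp h 0 (by omega)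
          norm_num at this; omega)]
        rw [ih image h_ (w + 1) f (by omega) (by omega)]
        exact bLoop_fuel ((626 - (w + 1)).toNat + 1) ((626 - w).toNat) image h_ (w + 1) (by omega) (by omega)
    · rw [r_detect_go, if_neg (show ¬ w < pv_width - Lane_D * 2 by simp only [pv_width, Lane_D]; omega),
          bLoop, if_neg (show ¬ w < b_WIDTH - 2 * b_LANE_D by simp only [b_WIDTH, b_LANE_D]; omega)]
      norm_num [check_w, pv_width, b_WIDTH]

-- ===== VERDICT (by name: the statement is the Claim_ definition above) =====
theorem r_detect_spec : Claim_equal_r_detect := by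
  intro image w h_ _ _
  unfold Spec_r_detect r_detect_alt r_detect
  rw [show b_WIDTH - 2 * b_LANE_D - w = 626 - w by norm_num [b_WIDTH, b_LANE_D]]
  exact main_eq (626 - w).toNat image h_ w _ (le_refl _) (by simp only [pv_width, Lane_D]; omega)
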